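-- pv_equiv track=rewrite | github.com/mrisho2348/raundhwa- | portal_management/views/exam_result.py | _calculate_cross_matrix
-- ===== SOURCE A (Python) =====
-- def _calculate_cross_matrix(students_data, level_type):
--     """Calculate gender x division/grade cross matrix"""
--
--     cross_matrix = {
--         'male': {},
--         'female': {},
--         'total': {}
--     }
--
--     for student in students_data:
--         if not student['has_results']:
--             continue
--
--         gender = student['gender_code']
--         if level_type in ['PRIMARY', 'NURSERY']:
--             value = student['grade']
--         else:
--             value = student['division']
--
--         if value == 'N/A':
--             continue
--
--         # Update gender-specific counts
--         if gender not in cross_matrix: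
--             cross_matrix[gender] = {}
--         cross_matrix[gender][value] = cross_matrix[gender].get(value, 0) + 1
--
--         # Update total counts
--         cross_matrix['total'][value] = cross_matrix['total'].get(value, 0) + 1
--
--     return cross_matrix
-- ===== SOURCE B (Python) =====
-- def _tally(values):
--     """Order-preserving tally: first-occurrence key order, value = multiplicity."""
--     values = list(values)
--     return {v: values.count(v) for v in dict.fromkeys(values)}
--
--
-- def _calculate_cross_matrix(students_data, level_type):
--     """Two-phase: collect the valid (gender, value) pairs, then tally and assemble."""
--     use_grade = level_type in ('PRIMARY', 'NURSERY')
--     pairs = []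
--     for student in students_data:
--         if not student['has_results']:
--             continue
--         gender = student['gender_code']
--         value = student['grade'] if use_grade else student['division']
--         if value != 'N/A':
--             pairs.append((gender, value))
--
--     cross_matrix = {
--         'male': _tally(v for g, v in pairs if g == 'male'),
--         'female': _tally(v for g, v in pairs if g == 'female'),
--         'total': _tally(v for g, v in pairs),
--     }
--     for gender, _ in pairs:
--         if gender not in cross_matrix:
--             cross_matrix[gender] = _tally(v for g, v in pairs if g == gender)
--     return cross_matrix
-- ===== Notes on version B (the rewrite author's own statement) =====
-- stated objective: alternative
-- what changed: Replaces A's single incremental loop that mutates nested dicts with a two-phase decomposition: first collect the flat list of valid (gender, value) pairs, then build each row of the matrix by an order-preserving tally over that list, appending extra gender rows in first-occurrence order.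
-- intended difference: On inputs where some counted student has gender_code == 'total', A's gender row and its 'total' row are the same dict entry so that student's value is added twice to 'total' (e.g. {'A': 2} for one student); B counts every student once in 'total' ({'A': 1}), which is the intended total. — e.g. on _calculate_cross_matrix([[("has_results", "1"), ("gender_code", "total"), ("grade", "A"), ("division", "I")]], "PRIMARY"): A returns [("male", []), ("female", []), ("total", [("A", 2)])], B returns [("male", []), ("female", []), ("total", [("A", 1)])]
import Mathlib
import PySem

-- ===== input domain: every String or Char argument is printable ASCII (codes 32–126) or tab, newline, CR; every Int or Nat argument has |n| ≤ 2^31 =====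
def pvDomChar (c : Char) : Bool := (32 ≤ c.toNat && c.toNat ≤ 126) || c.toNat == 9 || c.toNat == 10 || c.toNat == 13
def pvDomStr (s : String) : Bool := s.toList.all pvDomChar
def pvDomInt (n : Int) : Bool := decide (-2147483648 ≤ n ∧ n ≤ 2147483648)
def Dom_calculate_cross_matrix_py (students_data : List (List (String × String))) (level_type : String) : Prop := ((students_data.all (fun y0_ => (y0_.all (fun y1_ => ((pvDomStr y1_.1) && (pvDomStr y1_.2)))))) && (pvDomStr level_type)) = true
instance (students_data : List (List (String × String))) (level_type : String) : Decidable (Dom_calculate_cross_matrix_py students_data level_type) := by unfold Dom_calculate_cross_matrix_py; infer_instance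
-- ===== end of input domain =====

-- B replaces A's single incremental loop over nested dicts by a two-phase decomposition:
-- collect the valid (gender, value) pairs, then tally each row from that flat list.

-- shared lookup: student['k'] on the association-list representation of a Python dict
-- = value of the FIRST matching key (exact: under Pre_ the key is always present, so the
-- "" fallback of getD is never the source of a looked-up value)
def pvLookup (st : List (String × String)) (k : String) : String :=
  (((st.find? (fun p => p.1 == k)).map (fun p => p.2)).getD "")

-- ===== PORT A =====
-- A-side helper: the body of A's for-loop (one student folded into the nested dict)
def pvAStep (level_type : String) (cm : PySem.Dict String (PySem.Dict String Int))
    (st : List (String × String)) : PySem.Dict String (PySem.Dict String Int) :=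
  if pvLookup st "has_results" = "" then cm
  else
    let gender := pvLookup st "gender_code"
    let value := if level_type = "PRIMARY" ∨ level_type = "NURSERY" then pvLookup st "grade"
                 else pvLookup st "division"
    if value = "N/A" then cm
    else
      let cm := if cm.contains gender then cm else cm.insert gender PySem.Dict.empty
      let row := cm.getD gender PySem.Dict.empty
      let cm := cm.insert gender (row.insert value (row.getD value 0 + 1))
      let tot := cm.getD "total" PySem.Dict.empty
      cm.insert "total" (tot.insert value (tot.getD value 0 + 1))

def calculate_cross_matrix_py (students_data : List (List (String × String))) (level_type : String) : List (String × List (String × Int)) :=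
  let cm0 : PySem.Dict String (PySem.Dict String Int) :=
    PySem.Dict.mk [("male", PySem.Dict.empty), ("female", PySem.Dict.empty), ("total", PySem.Dict.empty)]
  let cm := students_data.foldl (pvAStep level_type) cm0
  cm.items.map (fun p => (p.1, p.2.items))

-- ===== PORT B =====
-- B-side helpers: phase 1 (collect the valid (gender, value) pairs) …
def pvPairs (students_data : List (List (String × String))) (level_type : String) : List (String × String) :=
  students_data.foldl (fun acc st =>
    if pvLookup st "has_results" = "" then acc
    else
      let gender := pvLookup st "gender_code"
      let value := if level_type = "PRIMARY" ∨ level_type = "NURSERY" then pvLookup st "grade"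
                   else pvLookup st "division"
      if value = "N/A" then acc else acc ++ [(gender, value)]) []

-- … and the order-preserving tally {v: values.count(v) for v in dict.fromkeys(values)}
def pvTally (values : List String) : PySem.Dict String Int :=
  (PySem.List.dedup values).foldl (fun d v => d.insert v ((values.count v : Int))) PySem.Dict.empty

def pvRowOf (pairs : List (String × String)) (g : String) : PySem.Dict String Int :=
  pvTally ((pairs.filter (fun p => p.1 == g)).map (fun p => p.2))

def calculate_cross_matrix_py_alt (students_data : List (List (String × String))) (level_type : String) : List (String × List (String × Int)) :=
  let pairs := pvPairs students_data level_type
  let cm : PySem.Dict String (PySem.Dict String Int) :=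
    PySem.Dict.mk [("male", pvRowOf pairs "male"), ("female", pvRowOf pairs "female"),
                   ("total", pvTally (pairs.map (fun p => p.2)))]
  let cm := pairs.foldl (fun cm p => if cm.contains p.1 then cm else cm.insert p.1 (pvRowOf pairs p.1)) cm
  cm.items.map (fun p => (p.1, p.2.items))

-- ===== PRECONDITION & SPEC =====
-- Pre_ excludes exactly the inputs on which A raises KeyError: a student record without
-- 'has_results', or a counted student (truthy 'has_results') without 'gender_code' or
-- without the level-appropriate 'grade'/'division' key.
def Pre_calculate_cross_matrix_py (students_data : List (List (String × String))) (level_type : String) : Prop :=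
  ∀ st ∈ students_data,
    (st.find? (fun p => p.1 == "has_results")).isSome ∧
    (pvLookup st "has_results" ≠ "" →
      (st.find? (fun p => p.1 == "gender_code")).isSome ∧
      (st.find? (fun p => p.1 ==
        (if level_type = "PRIMARY" ∨ level_type = "NURSERY" then "grade" else "division"))).isSome)
instance (students_data : List (List (String × String))) (level_type : String) : Decidable (Pre_calculate_cross_matrix_py students_data level_type) := by unfold Pre_calculate_cross_matrix_py; infer_instance

def pvWitness_calculate_cross_matrix_py : (List (List (String × String))) × String :=
  ([[("has_results", "1"), ("gender_code", "male"), ("grade", "A"), ("division", "I")],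
    [("has_results", ""), ("gender_code", "female"), ("grade", "B"), ("division", "II")]], "PRIMARY")

-- On inputs where some counted student has gender_code 'total', A adds that student's value twice
-- to the 'total' row (the gender row and the total row are the same dict entry), e.g. {'A': 2}
-- for a single student; B counts every student once in 'total', which is the intended total.
def D_calculate_cross_matrix_py (students_data : List (List (String × String))) (level_type : String) : Prop :=
  ∃ st ∈ students_data,
    (List.lookup "has_results" st).getD "" ≠ "" ∧
    List.lookup "gender_code" st = some "total" ∧
    (List.lookup (if level_type ∈ (["PRIMARY", "NURSERY"] : List String) then "grade" else "division") st).getD "" ≠ "N/A"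
instance (students_data : List (List (String × String))) (level_type : String) : Decidable (D_calculate_cross_matrix_py students_data level_type) := by unfold D_calculate_cross_matrix_py; infer_instance

def Spec_calculate_cross_matrix_py (students_data : List (List (String × String))) (level_type : String) (out : List (String × List (String × Int))) : Prop := ¬ D_calculate_cross_matrix_py students_data level_type → out = calculate_cross_matrix_py_alt students_data level_type
instance (students_data : List (List (String × String))) (level_type : String) (out : List (String × List (String × Int))) : Decidable (Spec_calculate_cross_matrix_py students_data level_type out) := by unfold Spec_calculate_cross_matrix_py; infer_instance

def pvDiffWitness_calculate_cross_matrix_py : (List (List (String × String))) × String :=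
  ([[("has_results", "1"), ("gender_code", "total"), ("grade", "A"), ("division", "I")]], "PRIMARY")

def pvDiffWitnessOut_calculate_cross_matrix_py : (List (String × List (String × Int))) × (List (String × List (String × Int))) :=
  ([("male", []), ("female", []), ("total", [("A", 2)])],
   [("male", []), ("female", []), ("total", [("A", 1)])])

-- ===== CLAIM (what is proved, stated in full; the proofs are below) =====
def Claim_unchanged_calculate_cross_matrix_py : Prop := ∀ (students_data : List (List (String × String))) (level_type : String), Dom_calculate_cross_matrix_py students_data level_type → Pre_calculate_cross_matrix_py students_data level_type → Spec_calculate_cross_matrix_py students_data level_type (calculate_cross_matrix_py students_data level_type)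

def Claim_changed_calculate_cross_matrix_py : Prop := Dom_calculate_cross_matrix_py (pvDiffWitness_calculate_cross_matrix_py.1) (pvDiffWitness_calculate_cross_matrix_py.2) ∧ Pre_calculate_cross_matrix_py (pvDiffWitness_calculate_cross_matrix_py.1) (pvDiffWitness_calculate_cross_matrix_py.2) ∧ D_calculate_cross_matrix_py (pvDiffWitness_calculate_cross_matrix_py.1) (pvDiffWitness_calculate_cross_matrix_py.2) ∧ calculate_cross_matrix_py (pvDiffWitness_calculate_cross_matrix_py.1) (pvDiffWitness_calculate_cross_matrix_py.2) = pvDiffWitnessOut_calculate_cross_matrix_py.1 ∧ calculate_cross_matrix_py_alt (pvDiffWitness_calculate_cross_matrix_py.1) (pvDiffWitness_calculate_cross_matrix_py.2) = pvDiffWitnessOut_calculate_cross_matrix_py.2 ∧ pvDiffWitnessOut_calculate_cross_matrix_py.1 ≠ pvDiffWitnessOut_calculate_cross_matrix_py.2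

def Claim_exact_calculate_cross_matrix_py : Prop := ∀ (students_data : List (List (String × String))) (level_type : String), Dom_calculate_cross_matrix_py students_data level_type → Pre_calculate_cross_matrix_py students_data level_type → D_calculate_cross_matrix_py students_data level_type → calculate_cross_matrix_py students_data level_type ≠ calculate_cross_matrix_py_alt students_data level_type


-- ===== LEMMAS AND PROOFS =====

theorem pvTally_eq_counter (vs : List String) : pvTally vs = PySem.Dict.counter vs := by
  apply PySem.Dict.ext
  rw [PySem.Dict.items_counter]
  unfold pvTally
  rw [PySem.Dict.items_foldl_insert_fresh (k := fun v => v) (v := fun v => (vs.count v : Int))]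
  · rw [show PySem.Dict.empty.items = ([] : List (String × Int)) from rfl]
    simp
  · intro a _; simp [PySem.Dict.contains_empty]
  · simp

theorem counter_snoc (vs : List String) (v : String) :
    PySem.Dict.counter (vs ++ [v]) = (PySem.Dict.counter vs).insert v ((PySem.Dict.counter vs).getD v 0 + 1) := by
  rw [← PySem.Dict.foldl_insert_getD_add_one_eq_counter, ← PySem.Dict.foldl_insert_getD_add_one_eq_counter, List.foldl_append]
  rfl

theorem counter_snoc2 (vs : List String) (v : String) :
    PySem.Dict.counter (vs ++ [v, v])
      = (PySem.Dict.counter vs).insert v ((PySem.Dict.counter vs).getD v 0 + 1 + 1) := by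
  rw [show vs ++ [v, v] = (vs ++ [v]) ++ [v] by simp]
  rw [counter_snoc, counter_snoc, PySem.Dict.getD_insert_self, PySem.Dict.insert_insert_self]

theorem getD_mk_map (gs : List String) (f : String → PySem.Dict String Int) (g : String) :
    (PySem.Dict.mk (gs.map (fun x => (x, f x)))).getD g PySem.Dict.empty
      = if g ∈ gs then f g else PySem.Dict.empty := by
  induction gs with
  | nil => simp [PySem.Dict.getD_eq_get?_getD, PySem.Dict.get?]
  | cons a t ih =>
    rw [List.map_cons]
    rw [PySem.Dict.getD_eq_get?_getD, PySem.Dict.get?_mk_cons]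
    by_cases h : a = g
    · subst h; simp
    · simp only [beq_iff_eq, if_neg h, ← PySem.Dict.getD_eq_get?_getD, ih]
      simp [List.mem_cons, Ne.symm h]

theorem contains_mk_map (gs : List String) (f : String → PySem.Dict String Int) (g : String) :
    (PySem.Dict.mk (gs.map (fun x => (x, f x)))).contains g = decide (g ∈ gs) := by
  rw [PySem.Dict.contains_mk, List.any_map]
  rw [show ((fun p => p.1 == g) ∘ fun x => (x, f x)) = fun x => x == g from rfl]
  rw [List.any_beq', List.contains_eq_mem]

def pvStep (cm : PySem.Dict String (PySem.Dict String Int)) (p : String × String) :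
    PySem.Dict String (PySem.Dict String Int) :=
  let cm := if cm.contains p.1 then cm else cm.insert p.1 PySem.Dict.empty
  let row := cm.getD p.1 PySem.Dict.empty
  let cm := cm.insert p.1 (row.insert p.2 (row.getD p.2 0 + 1))
  let tot := cm.getD "total" PySem.Dict.empty
  cm.insert "total" (tot.insert p.2 (tot.getD p.2 0 + 1))

-- the value stream A's 'total' row actually counts: a pair with gender "total" is counted twice
def pvDup (ps : List (String × String)) : List String :=
  ps.flatMap (fun p => if p.1 == "total" then [p.2, p.2] else [p.2])

-- B's row contents (the intended ones)
def pvRowT (ps : List (String × String)) (g : String) : PySem.Dict String Int :=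
  if g = "total" then PySem.Dict.counter (ps.map (fun p => p.2))
  else PySem.Dict.counter ((ps.filter (fun p => p.1 == g)).map (fun p => p.2))

-- A's row contents (general, including the "total"-gender double count)
def pvRowT' (ps : List (String × String)) (g : String) : PySem.Dict String Int :=
  if g = "total" then PySem.Dict.counter (pvDup ps)
  else PySem.Dict.counter ((ps.filter (fun p => p.1 == g)).map (fun p => p.2))

def pvGens (ps : List (String × String)) : List String :=
  PySem.Set.update ["male", "female", "total"] (ps.map (fun p => p.1))

theorem total_mem_pvGens (ps : List (String × String)) : "total" ∈ pvGens ps := by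
  apply (PySem.Set.mem_update _ _ _).2
  left; simp

theorem pvGens_snoc (ps : List (String × String)) (p : String × String) :
    pvGens (ps ++ [p]) = PySem.Set.add (pvGens ps) p.1 := by
  unfold pvGens
  rw [List.map_append, PySem.Set.update, List.foldl_append]
  rfl

theorem pvDup_snoc (ps : List (String × String)) (p : String × String) :
    pvDup (ps ++ [p]) = pvDup ps ++ (if p.1 == "total" then [p.2, p.2] else [p.2]) := by
  simp [pvDup]

theorem pvRowT'_snoc_self (ps : List (String × String)) (g v : String) (hg : g ≠ "total") :
    pvRowT' (ps ++ [(g, v)]) g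
      = (pvRowT' ps g).insert v ((pvRowT' ps g).getD v 0 + 1) := by
  unfold pvRowT'
  rw [if_neg hg, if_neg hg, List.filter_append, List.map_append]
  simp only [List.filter_cons, List.filter_nil, beq_self_eq_true, if_pos, List.map_cons, List.map_nil]
  exact counter_snoc _ v

theorem pvRowT'_snoc_total_ne (ps : List (String × String)) (g v : String) (hg : g ≠ "total") :
    pvRowT' (ps ++ [(g, v)]) "total"
      = (pvRowT' ps "total").insert v ((pvRowT' ps "total").getD v 0 + 1) := by
  unfold pvRowT'
  rw [if_pos rfl, if_pos rfl, pvDup_snoc]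
  rw [show (if (((g, v) : String × String).1 == "total") = true then [((g, v) : String × String).2, (g, v).2] else [(g, v).2]) = [v] from by
    simp [hg]]
  exact counter_snoc _ v

theorem pvRowT'_snoc_total_eq (ps : List (String × String)) (v : String) :
    pvRowT' (ps ++ [("total", v)]) "total"
      = (pvRowT' ps "total").insert v ((pvRowT' ps "total").getD v 0 + 1 + 1) := by
  unfold pvRowT'
  rw [if_pos rfl, if_pos rfl, pvDup_snoc]
  rw [show (if ((("total", v) : String × String).1 == "total") = true then [(("total", v) : String × String).2, ("total", v).2] else [("total", v).2]) = [v, v] from by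
    simp]
  exact counter_snoc2 _ v

theorem pvRowT'_snoc_other (ps : List (String × String)) (g v x : String)
    (hx : x ≠ g) (ht : x ≠ "total") :
    pvRowT' (ps ++ [(g, v)]) x = pvRowT' ps x := by
  unfold pvRowT'
  rw [if_neg ht, if_neg ht, List.filter_append]
  rw [show ([((g : String), (v : String))].filter (fun p => p.1 == x)) = [] by
    simp [Ne.symm hx]]
  rw [List.append_nil]

def pvCanon (gs : List String) (ps : List (String × String)) : List (String × PySem.Dict String Int) :=
  gs.map (fun g => (g, pvRowT ps g))

def pvCanon' (gs : List String) (ps : List (String × String)) : List (String × PySem.Dict String Int) :=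
  gs.map (fun g => (g, pvRowT' ps g))

def pvCM0 : PySem.Dict String (PySem.Dict String Int) :=
  PySem.Dict.mk [("male", PySem.Dict.empty), ("female", PySem.Dict.empty), ("total", PySem.Dict.empty)]

theorem filter_eq_nil_of_not_mem_gens (ps : List (String × String)) (g : String)
    (h : g ∉ pvGens ps) : ps.filter (fun p => p.1 == g) = [] := by
  rw [List.filter_eq_nil_iff]
  intro q hq
  simp only [beq_iff_eq]
  intro hg
  exact h ((PySem.Set.mem_update _ _ _).2 (Or.inr (List.mem_map.2 ⟨q, hq, hg⟩)))

theorem pvRowT'_empty_of_not_mem (ps : List (String × String)) (g : String)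
    (hg : g ≠ "total") (h : g ∉ pvGens ps) : pvRowT' ps g = PySem.Dict.empty := by
  unfold pvRowT'
  rw [if_neg hg, filter_eq_nil_of_not_mem_gens ps g h]
  rfl

theorem step_canon (ps : List (String × String)) (p : String × String) :
    pvStep (PySem.Dict.mk (pvCanon' (pvGens ps) ps)) p
      = PySem.Dict.mk (pvCanon' (pvGens (ps ++ [p])) (ps ++ [p])) := by
  obtain ⟨g, v⟩ := p
  unfold pvStep pvCanon'
  simp only
  by_cases hp : g = "total"
  · subst hp
    rw [contains_mk_map]
    rw [if_pos (by simpa using total_mem_pvGens ps)]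
    rw [getD_mk_map, if_pos (total_mem_pvGens ps)]
    rw [PySem.Dict.getD_insert, if_pos rfl]
    rw [PySem.Dict.getD_insert_self, PySem.Dict.insert_insert_self]
    apply PySem.Dict.ext
    rw [PySem.Dict.items_insert_of_contains _ _ (by rw [contains_mk_map]; simpa using total_mem_pvGens ps)]
    rw [show (PySem.Dict.mk ((pvGens ps).map (fun g => (g, pvRowT' ps g)))).items
        = (pvGens ps).map (fun g => (g, pvRowT' ps g)) from rfl]
    rw [show (PySem.Dict.mk ((pvGens (ps ++ [("total", v)])).map (fun x => (x, pvRowT' (ps ++ [("total", v)]) x)))).items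
        = (pvGens (ps ++ [("total", v)])).map (fun x => (x, pvRowT' (ps ++ [("total", v)]) x)) from rfl]
    rw [pvGens_snoc]
    rw [show PySem.Set.add (pvGens ps) (("total", v) : String × String).1 = pvGens ps from by
      unfold PySem.Set.add
      rw [if_pos (by simpa [List.contains_eq_mem] using total_mem_pvGens ps)]]
    rw [List.map_map]
    apply List.map_congr_left
    intro x hx
    simp only [Function.comp]
    by_cases hxt : x = "total"
    · subst hxt
      simp
      rw [pvRowT'_snoc_total_eq, PySem.Dict.insert_insert_self]
    · simp [hxt]
      rw [pvRowT'_snoc_other ps "total" v x hxt hxt]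
  · by_cases hmem : g ∈ pvGens ps
    · rw [contains_mk_map]
      rw [if_pos (by simpa using hmem)]
      rw [getD_mk_map, if_pos hmem]
      rw [PySem.Dict.getD_insert, if_neg (by exact fun h => hp h.symm)]
      rw [getD_mk_map, if_pos (total_mem_pvGens ps)]
      apply PySem.Dict.ext
      rw [PySem.Dict.items_insert_of_contains _ _
        (by rw [PySem.Dict.contains_insert]; simp [total_mem_pvGens ps])]
      rw [PySem.Dict.items_insert_of_contains _ _ (by rw [contains_mk_map]; simpa using hmem)]
      rw [show (PySem.Dict.mk ((pvGens ps).map (fun g => (g, pvRowT' ps g)))).items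
          = (pvGens ps).map (fun g => (g, pvRowT' ps g)) from rfl]
      rw [show (PySem.Dict.mk ((pvGens (ps ++ [(g, v)])).map (fun x => (x, pvRowT' (ps ++ [(g, v)]) x)))).items
          = (pvGens (ps ++ [(g, v)])).map (fun x => (x, pvRowT' (ps ++ [(g, v)]) x)) from rfl]
      rw [pvGens_snoc]
      rw [show PySem.Set.add (pvGens ps) (g, v).1 = pvGens ps from by
        unfold PySem.Set.add
        rw [if_pos (by simpa [List.contains_eq_mem] using hmem)]]
      rw [List.map_map, List.map_map]
      apply List.map_congr_left
      intro x hx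
      simp only [Function.comp]
      by_cases hxg : x = g
      · subst hxg
        simp [hp]
        rw [pvRowT'_snoc_self ps x v hp]
      · by_cases hxt : x = "total"
        · subst hxt
          simp [hxg]
          rw [pvRowT'_snoc_total_ne ps g v hp]
        · simp [hxg, hxt]
          rw [pvRowT'_snoc_other ps g v x hxg hxt]
    · rw [contains_mk_map]
      rw [if_neg (by simpa using hmem)]
      rw [PySem.Dict.getD_insert, if_pos rfl]
      rw [PySem.Dict.insert_insert_self]
      rw [PySem.Dict.getD_insert, if_neg (fun h => hp h.symm)]
      rw [getD_mk_map, if_pos (total_mem_pvGens ps)]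
      apply PySem.Dict.ext
      rw [PySem.Dict.items_insert_of_contains _ _
        (by rw [PySem.Dict.contains_insert]; simp [total_mem_pvGens ps])]
      rw [PySem.Dict.items_insert_of_not_contains _ _ (by rw [contains_mk_map]; simpa using hmem)]
      rw [show (PySem.Dict.mk ((pvGens ps).map (fun g => (g, pvRowT' ps g)))).items
          = (pvGens ps).map (fun g => (g, pvRowT' ps g)) from rfl]
      rw [show (PySem.Dict.mk ((pvGens (ps ++ [(g, v)])).map (fun x => (x, pvRowT' (ps ++ [(g, v)]) x)))).items
          = (pvGens (ps ++ [(g, v)])).map (fun x => (x, pvRowT' (ps ++ [(g, v)]) x)) from rfl]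
      rw [pvGens_snoc]
      rw [show PySem.Set.add (pvGens ps) (g, v).1 = pvGens ps ++ [g] from by
        unfold PySem.Set.add
        rw [if_neg (by simpa [List.contains_eq_mem] using hmem)]]
      rw [List.map_append, List.map_append, List.map_map]
      congr 1
      · apply List.map_congr_left
        intro x hx
        simp only [Function.comp]
        have hxg : x ≠ g := fun h => hmem (h ▸ hx)
        by_cases hxt : x = "total"
        · subst hxt
          simp
          rw [pvRowT'_snoc_total_ne ps g v hp]
        · simp [hxt]
          rw [pvRowT'_snoc_other ps g v x hxg hxt]
      · simp only [List.map_cons, List.map_nil]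
        simp [hp]
        rw [pvRowT'_snoc_self ps g v hp]
        rw [pvRowT'_empty_of_not_mem ps g hp hmem]
        rw [show (PySem.Dict.empty : PySem.Dict String Int).getD v 0 = 0 from rfl]
        norm_num

theorem afold_canon' (ps : List (String × String)) :
    ps.foldl pvStep pvCM0 = PySem.Dict.mk (pvCanon' (pvGens ps) ps) := by
  induction ps using List.reverseRecOn with
  | nil =>
    unfold pvCM0 pvCanon' pvGens
    decide
  | append_singleton ps p ih =>
    rw [List.foldl_append, ih]
    exact step_canon ps p

theorem pvDup_eq_map (ps : List (String × String)) (h : ∀ q ∈ ps, q.1 ≠ "total") :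
    pvDup ps = ps.map (fun p => p.2) := by
  induction ps with
  | nil => rfl
  | cons p t ih =>
    rw [show pvDup (p :: t) = (if p.1 == "total" then [p.2, p.2] else [p.2]) ++ pvDup t from by
      simp [pvDup]]
    rw [if_neg (by simpa using h p List.mem_cons_self)]
    rw [ih (fun q hq => h q (List.mem_cons_of_mem _ hq))]
    rfl

theorem canon'_eq_canon (gs : List String) (ps : List (String × String))
    (h : ∀ q ∈ ps, q.1 ≠ "total") : pvCanon' gs ps = pvCanon gs ps := by
  unfold pvCanon' pvCanon
  apply List.map_congr_left
  intro g _
  unfold pvRowT' pvRowT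
  by_cases hgt : g = "total"
  · rw [if_pos hgt, if_pos hgt, pvDup_eq_map ps h]
  · rw [if_neg hgt, if_neg hgt]

def pvEmit (level_type : String) (st : List (String × String)) : List (String × String) :=
  if pvLookup st "has_results" = "" then []
  else
    let value := if level_type = "PRIMARY" ∨ level_type = "NURSERY" then pvLookup st "grade"
                 else pvLookup st "division"
    if value = "N/A" then [] else [(pvLookup st "gender_code", value)]

theorem pvAStep_emit (level_type : String) (cm : PySem.Dict String (PySem.Dict String Int))
    (st : List (String × String)) :
    pvAStep level_type cm st = (pvEmit level_type st).foldl pvStep cm := by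
  unfold pvAStep pvEmit
  dsimp only
  by_cases h1 : pvLookup st "has_results" = ""
  · rw [if_pos h1, if_pos h1]; rfl
  · rw [if_neg h1, if_neg h1]
    by_cases h2 : (if level_type = "PRIMARY" ∨ level_type = "NURSERY" then pvLookup st "grade"
                   else pvLookup st "division") = "N/A"
    · rw [if_pos h2, if_pos h2]; rfl
    · rw [if_neg h2, if_neg h2]
      rfl

theorem afold_flat (level_type : String) (sd : List (List (String × String))) :
    ∀ cm, sd.foldl (pvAStep level_type) cm
      = (sd.flatMap (pvEmit level_type)).foldl pvStep cm := by
  induction sd with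
  | nil => intro cm; rfl
  | cons st t ih =>
    intro cm
    rw [List.foldl_cons, List.flatMap_cons, List.foldl_append, ih, pvAStep_emit]

theorem pvPairs_fold_acc (level_type : String) (sd : List (List (String × String))) :
    ∀ acc, sd.foldl (fun acc st =>
      if pvLookup st "has_results" = "" then acc
      else
        let gender := pvLookup st "gender_code"
        let value := if level_type = "PRIMARY" ∨ level_type = "NURSERY" then pvLookup st "grade"
                     else pvLookup st "division"
        if value = "N/A" then acc else acc ++ [(gender, value)]) acc
      = acc ++ sd.flatMap (pvEmit level_type) := by
  induction sd with
  | nil => intro acc; simp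
  | cons st t ih =>
    intro acc
    rw [List.foldl_cons, List.flatMap_cons]
    have this : (if pvLookup st "has_results" = "" then acc
      else
        let gender := pvLookup st "gender_code"
        let value := if level_type = "PRIMARY" ∨ level_type = "NURSERY" then pvLookup st "grade"
                     else pvLookup st "division"
        if value = "N/A" then acc else acc ++ [(gender, value)]) = acc ++ pvEmit level_type st := by
      unfold pvEmit
      dsimp only
      by_cases h1 : pvLookup st "has_results" = ""
      · rw [if_pos h1, if_pos h1]; simp
      · rw [if_neg h1, if_neg h1]
        by_cases h2 : (if level_type = "PRIMARY" ∨ level_type = "NURSERY" then pvLookup st "grade"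
                       else pvLookup st "division") = "N/A"
        · rw [if_pos h2, if_pos h2]; simp
        · rw [if_neg h2, if_neg h2]
    rw [this, ih, List.append_assoc]

theorem pvPairs_eq (sd : List (List (String × String))) (level_type : String) :
    pvPairs sd level_type = sd.flatMap (pvEmit level_type) := by
  unfold pvPairs
  simpa using pvPairs_fold_acc level_type sd []

theorem pvRowOf_eq_rowT (ps : List (String × String)) (g : String) (hg : g ≠ "total") :
    pvRowOf ps g = pvRowT ps g := by
  unfold pvRowOf pvRowT
  rw [if_neg hg, pvTally_eq_counter]

theorem extras_canon (ps : List (String × String)) (l : List (String × String)) :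
    ∀ gs : List String, "total" ∈ gs →
    l.foldl (fun cm p => if cm.contains p.1 then cm else cm.insert p.1 (pvRowOf ps p.1))
        (PySem.Dict.mk (pvCanon gs ps))
      = PySem.Dict.mk (pvCanon (PySem.Set.update gs (l.map (fun p => p.1))) ps) := by
  induction l with
  | nil => intro gs _; rfl
  | cons p t ih =>
    intro gs hgs
    rw [List.foldl_cons, List.map_cons]
    rw [show PySem.Set.update gs (p.1 :: t.map (fun p => p.1))
        = PySem.Set.update (PySem.Set.add gs p.1) (t.map (fun p => p.1)) from rfl]
    unfold pvCanon
    rw [contains_mk_map]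
    by_cases hmem : p.1 ∈ gs
    · rw [if_pos (by simpa using hmem)]
      rw [show PySem.Set.add gs p.1 = gs from by
        unfold PySem.Set.add
        rw [if_pos (by simpa [List.contains_eq_mem] using hmem)]]
      exact ih gs hgs
    · rw [if_neg (by simpa using hmem)]
      rw [show PySem.Set.add gs p.1 = gs ++ [p.1] from by
        unfold PySem.Set.add
        rw [if_neg (by simpa [List.contains_eq_mem] using hmem)]]
      have hp1 : p.1 ≠ "total" := fun h => hmem (h ▸ hgs)
      have hins : (PySem.Dict.mk (gs.map (fun g => (g, pvRowT ps g)))).insert p.1 (pvRowOf ps p.1)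
          = PySem.Dict.mk (pvCanon (gs ++ [p.1]) ps) := by
        apply PySem.Dict.ext
        rw [PySem.Dict.items_insert_of_not_contains _ _ (by rw [contains_mk_map]; simpa using hmem)]
        unfold pvCanon
        rw [show (PySem.Dict.mk (gs.map (fun g => (g, pvRowT ps g)))).items
            = gs.map (fun g => (g, pvRowT ps g)) from rfl]
        rw [show (PySem.Dict.mk ((gs ++ [p.1]).map (fun g => (g, pvRowT ps g)))).items
            = (gs ++ [p.1]).map (fun g => (g, pvRowT ps g)) from rfl]
        rw [List.map_append, List.map_cons, List.map_nil]
        rw [pvRowOf_eq_rowT ps p.1 hp1]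
      rw [hins]
      exact ih (gs ++ [p.1]) (List.mem_append_left _ hgs)

theorem pvLookup_eq_lookup (st : List (String × String)) (k : String) :
    pvLookup st k = (List.lookup k st).getD "" := by
  induction st with
  | nil => rfl
  | cons p t ih =>
    obtain ⟨a, b⟩ := p
    by_cases h : a = k
    · subst h
      simp [pvLookup, List.lookup]
    · rw [show List.lookup k ((a, b) :: t) = List.lookup k t from by
        simp [List.lookup, show (k == a) = false by simpa using fun e : k = a => h e.symm]]
      simpa [pvLookup, List.find?_cons, show (a == k) = false by simpa using h] using ih

theorem keyif_eq (lt : String) :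
    (if lt ∈ (["PRIMARY", "NURSERY"] : List String) then "grade" else "division")
      = (if lt = "PRIMARY" ∨ lt = "NURSERY" then "grade" else "division") := by
  by_cases hl : lt = "PRIMARY" ∨ lt = "NURSERY"
  · rw [if_pos hl, if_pos (by simpa using hl)]
  · rw [if_neg hl, if_neg (by simpa using hl)]

theorem noTotal_of_not_D (sd : List (List (String × String))) (lt : String)
    (hD : ¬ D_calculate_cross_matrix_py sd lt) :
    ∀ q ∈ sd.flatMap (pvEmit lt), q.1 ≠ "total" := by
  intro q hq
  rw [List.mem_flatMap] at hq
  obtain ⟨st, hst, hq⟩ := hq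
  unfold pvEmit at hq
  by_cases h1 : pvLookup st "has_results" = ""
  · rw [if_pos h1] at hq; simp at hq
  · rw [if_neg h1] at hq
    dsimp only at hq
    by_cases h2 : (if lt = "PRIMARY" ∨ lt = "NURSERY" then pvLookup st "grade"
                   else pvLookup st "division") = "N/A"
    · rw [if_pos h2] at hq; simp at hq
    · rw [if_neg h2] at hq
      rw [List.mem_singleton] at hq
      intro hgt
      apply hD
      rw [hq] at hgt
      simp only at hgt
      refine ⟨st, hst, ?_, ?_, ?_⟩
      · rw [← pvLookup_eq_lookup]; exact h1
      · have := hgt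
        rw [pvLookup_eq_lookup] at this
        cases hfind : List.lookup "gender_code" st with
        | none => rw [hfind] at this; exact absurd this.symm (by decide)
        | some v =>
          rw [hfind] at this
          exact congrArg some (by simpa using this)
      · rw [keyif_eq]
        by_cases hl : lt = "PRIMARY" ∨ lt = "NURSERY"
        · rw [if_pos hl, ← pvLookup_eq_lookup]
          rw [if_pos hl] at h2; exact h2
        · rw [if_neg hl, ← pvLookup_eq_lookup]
          rw [if_neg hl] at h2; exact h2

theorem pvBase_eq (ps : List (String × String)) :
    PySem.Dict.mk [("male", pvRowOf ps "male"), ("female", pvRowOf ps "female"),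
                   ("total", pvTally (ps.map (fun p => p.2)))]
      = PySem.Dict.mk (pvCanon ["male", "female", "total"] ps) := by
  unfold pvCanon
  simp only [List.map_cons, List.map_nil]
  rw [pvRowOf_eq_rowT _ _ (by decide), pvRowOf_eq_rowT _ _ (by decide), pvTally_eq_counter]
  rw [show pvRowT ps "total" = PySem.Dict.counter (ps.map (fun p => p.2)) from by
    unfold pvRowT; rw [if_pos rfl]]

theorem a_characterization (sd : List (List (String × String))) (lt : String) :
    calculate_cross_matrix_py sd lt
      = (PySem.Dict.mk (pvCanon' (pvGens (sd.flatMap (pvEmit lt))) (sd.flatMap (pvEmit lt)))).items.map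
          (fun p => (p.1, p.2.items)) := by
  unfold calculate_cross_matrix_py
  dsimp only
  rw [afold_flat]
  rw [show PySem.Dict.mk [("male", (PySem.Dict.empty : PySem.Dict String Int)), ("female", PySem.Dict.empty), ("total", PySem.Dict.empty)] = pvCM0 from rfl]
  rw [afold_canon']

theorem b_characterization (sd : List (List (String × String))) (lt : String) :
    calculate_cross_matrix_py_alt sd lt
      = (PySem.Dict.mk (pvCanon (pvGens (sd.flatMap (pvEmit lt))) (sd.flatMap (pvEmit lt)))).items.map
          (fun p => (p.1, p.2.items)) := by
  unfold calculate_cross_matrix_py_alt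
  dsimp only
  rw [pvPairs_eq, pvBase_eq, extras_canon _ _ _ (by simp)]
  rfl

theorem main_eq (sd : List (List (String × String))) (lt : String)
    (hD : ¬ D_calculate_cross_matrix_py sd lt) :
    calculate_cross_matrix_py sd lt = calculate_cross_matrix_py_alt sd lt := by
  rw [a_characterization, b_characterization,
    canon'_eq_canon _ _ (noTotal_of_not_D sd lt hD)]

theorem map_eq_map_mem {α β : Type} (f h : α → β) : ∀ l : List α,
    l.map f = l.map h → ∀ x ∈ l, f x = h x := by
  intro l
  induction l with
  | nil => intro _ x hx; cases hx
  | cons a t ih =>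
    intro he x hx
    rw [List.map_cons, List.map_cons] at he
    injection he with he1 he2
    rcases List.mem_cons.1 hx with rfl | hx'
    · exact he1
    · exact ih he2 x hx'

theorem count_pvDup (v0 : String) : ∀ ps : List (String × String),
    (ps.map (fun p => p.2)).count v0 ≤ (pvDup ps).count v0 ∧
    (("total", v0) ∈ ps → (ps.map (fun p => p.2)).count v0 < (pvDup ps).count v0) := by
  intro ps
  induction ps with
  | nil => exact ⟨Nat.le_refl _, fun h => absurd h (List.not_mem_nil)⟩
  | cons p t ih =>
    obtain ⟨ih1, ih2⟩ := ih
    have hd : pvDup (p :: t) = (if p.1 == "total" then [p.2, p.2] else [p.2]) ++ pvDup t := by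
      simp [pvDup]
    by_cases h1 : p.1 = "total"
    · by_cases h2 : p.2 = v0
      · constructor
        · simp [hd, h1, h2]
          omega
        · intro _
          simp [hd, h1, h2]
          omega
      · constructor
        · simp [hd, h1, h2, List.count_cons, List.count_append,
            show (p.2 == v0) = false by simpa using h2]
          omega
        · intro hm
          have hm' : ("total", v0) ∈ t := by
            rcases List.mem_cons.1 hm with he | hm'
            · exact absurd (congrArg Prod.snd he.symm) h2
            · exact hm'
          simp [hd, h1, h2, List.count_cons, List.count_append,
            show (p.2 == v0) = false by simpa using h2]
          have := ih2 hm'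
          omega
    · constructor
      · simp [hd, show (p.1 == "total") = false by simpa using h1, List.count_cons,
          List.count_append]
        omega
      · intro hm
        have hm' : ("total", v0) ∈ t := by
          rcases List.mem_cons.1 hm with he | hm'
          · exact absurd (congrArg Prod.fst he.symm) h1
          · exact hm'
        simp [hd, show (p.1 == "total") = false by simpa using h1, List.count_cons,
          List.count_append]
        have := ih2 hm'
        omega

theorem mem_pairs_of_D (sd : List (List (String × String))) (lt : String)
    (hD : D_calculate_cross_matrix_py sd lt) :
    ∃ v0, ("total", v0) ∈ sd.flatMap (pvEmit lt) := by
  obtain ⟨st, hst, h1, h2, h3⟩ := hD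
  rw [keyif_eq] at h3
  have h1' : pvLookup st "has_results" ≠ "" := by rw [pvLookup_eq_lookup]; exact h1
  have h2' : pvLookup st "gender_code" = "total" := by
    rw [pvLookup_eq_lookup, h2]; rfl
  have h3' : (if lt = "PRIMARY" ∨ lt = "NURSERY" then pvLookup st "grade"
      else pvLookup st "division") ≠ "N/A" := by
    by_cases hl : lt = "PRIMARY" ∨ lt = "NURSERY"
    · rw [if_pos hl]; rw [if_pos hl] at h3; rw [pvLookup_eq_lookup]; exact h3
    · rw [if_neg hl]; rw [if_neg hl] at h3; rw [pvLookup_eq_lookup]; exact h3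
  refine ⟨(if lt = "PRIMARY" ∨ lt = "NURSERY" then pvLookup st "grade"
    else pvLookup st "division"), List.mem_flatMap.2 ⟨st, hst, ?_⟩⟩
  unfold pvEmit
  rw [if_neg h1']
  dsimp only
  rw [if_neg h3', h2']
  exact List.mem_singleton.2 rfl

theorem tight_ne (sd : List (List (String × String))) (lt : String)
    (hD : D_calculate_cross_matrix_py sd lt) :
    calculate_cross_matrix_py sd lt ≠ calculate_cross_matrix_py_alt sd lt := by
  intro heq
  obtain ⟨v0, hv0⟩ := mem_pairs_of_D sd lt hD
  rw [a_characterization, b_characterization] at heq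
  unfold pvCanon' pvCanon at heq
  rw [show (PySem.Dict.mk ((pvGens (sd.flatMap (pvEmit lt))).map (fun g => (g, pvRowT' (sd.flatMap (pvEmit lt)) g)))).items
      = (pvGens (sd.flatMap (pvEmit lt))).map (fun g => (g, pvRowT' (sd.flatMap (pvEmit lt)) g)) from rfl] at heq
  rw [show (PySem.Dict.mk ((pvGens (sd.flatMap (pvEmit lt))).map (fun g => (g, pvRowT (sd.flatMap (pvEmit lt)) g)))).items
      = (pvGens (sd.flatMap (pvEmit lt))).map (fun g => (g, pvRowT (sd.flatMap (pvEmit lt)) g)) from rfl] at heq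
  rw [List.map_map, List.map_map] at heq
  have hrow := map_eq_map_mem _ _ _ heq "total" (total_mem_pvGens _)
  simp only [Function.comp] at hrow
  have hitems : (pvRowT' (sd.flatMap (pvEmit lt)) "total").items
      = (pvRowT (sd.flatMap (pvEmit lt)) "total").items := by
    simpa using hrow
  have hdict := PySem.Dict.ext hitems
  unfold pvRowT' pvRowT at hdict
  rw [if_pos rfl, if_pos rfl] at hdict
  have hg := congrArg (fun d => PySem.Dict.getD d v0 0) hdict
  simp only at hg
  rw [PySem.Dict.getD_counter, PySem.Dict.getD_counter] at hg
  have hcount : (pvDup (sd.flatMap (pvEmit lt))).count v0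
      = ((sd.flatMap (pvEmit lt)).map (fun p => p.2)).count v0 := by
    exact_mod_cast hg
  have := (count_pvDup v0 (sd.flatMap (pvEmit lt))).2 hv0
  omega

-- ===== VERDICT (by name: the statement is the Claim_ definition above) =====
theorem calculate_cross_matrix_py_spec : Claim_unchanged_calculate_cross_matrix_py := by
  intro students_data level_type _ _ hD
  exact main_eq students_data level_type hD

theorem calculate_cross_matrix_py_changed : Claim_changed_calculate_cross_matrix_py := by
  unfold Claim_changed_calculate_cross_matrix_py; decide

theorem calculate_cross_matrix_py_tight : Claim_exact_calculate_cross_matrix_py := by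
  intro students_data level_type _ _ hD
  exact tight_ne students_data level_type hD
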